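-- pv_equiv track=rewrite | github.com/hakituo/xiaoyou-core | core/tools/study/biology/genetics_calculator.py | validate_genotype
-- ===== SOURCE A (Python) =====
-- def validate_genotype(genotype: str, gene_count: int) -> bool:
--     """
--     验证基因型格式是否正确
--
--     Args:
--         genotype: 基因型字符串
--         gene_count: 基因数量
--
--     Returns:
--         bool: 基因型是否有效
--     """
--     try:
--         # 移除空格
--         genotype = genotype.strip().replace(" ", "")
--
--         # 检查基因型长度
--         if len(genotype) != gene_count * 2:
--             return False
--
--         # 检查每对基因是否由相同字母组成（大小写不同）
--         for i in range(0, len(genotype), 2):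
--             gene_pair = genotype[i:i+2]
--             if gene_pair[0].lower() != gene_pair[1].lower():
--                 return False
--
--         # 检查是否包含相同基因的不同字母
--         genes = set()
--         for i in range(0, len(genotype), 2):
--             gene = genotype[i].lower()
--             if gene in genes:
--                 return False
--             genes.add(gene)
--
--         return True
--     except Exception:
--         return False
-- ===== SOURCE B (Python) =====
-- def validate_genotype(genotype: str, gene_count: int) -> bool:
--     g = genotype.strip().replace(" ", "")
--     if len(g) != gene_count * 2:
--         return False
--     for i in range(0, len(g), 2):
--         a = g[i].lower()
--         if a != g[i + 1].lower():
--             return False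
--         # brute-force lookahead: this gene letter must not reappear as a later pair's letter
--         for j in range(i + 2, len(g), 2):
--             if a == g[j].lower():
--                 return False
--     return True
-- ===== Notes on version B (the rewrite author's own statement) =====
-- stated objective: alternative
-- what changed: B replaces A's two staged passes (pair check, then incremental seen-set with early return) by a single fused loop that detects duplicate gene letters with a brute-force lookahead scan over the remaining pairs, maintaining no set or auxiliary state at all; the try/except wrapper disappears since B's indexing can never raise.
import Mathlib
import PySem

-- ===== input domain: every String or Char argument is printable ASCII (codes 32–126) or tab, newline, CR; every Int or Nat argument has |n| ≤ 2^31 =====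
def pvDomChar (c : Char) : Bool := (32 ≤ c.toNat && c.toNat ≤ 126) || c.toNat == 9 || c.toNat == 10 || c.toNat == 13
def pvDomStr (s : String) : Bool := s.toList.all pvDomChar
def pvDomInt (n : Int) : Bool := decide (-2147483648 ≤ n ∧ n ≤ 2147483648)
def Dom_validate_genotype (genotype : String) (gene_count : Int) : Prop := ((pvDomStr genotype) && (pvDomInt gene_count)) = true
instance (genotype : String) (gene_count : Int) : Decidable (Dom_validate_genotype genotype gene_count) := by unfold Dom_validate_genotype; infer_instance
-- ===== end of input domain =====

-- B fuses everything into one loop with no auxiliary state: each pair is checked and its gene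
-- letter is searched for by a brute-force lookahead scan over the later pairs, instead of A's
-- two staged passes with an incremental seen-set (objective: alternative; B is O(n^2)).

-- ===== PORT A =====
-- first loop: for i in range(0, len, 2): gene_pair = g[i:i+2]; compare lowered chars.
-- the [_] case is g[i:i+2] of length 1: gene_pair[1] raises IndexError, caught by `except` → False
-- (unreachable after the even-length guard).
def aPairLoop : List Char → Bool
  | [] => true
  | [_] => false
  | a :: b :: rest =>
      if PySem.Chars.lowerChar a != PySem.Chars.lowerChar b then false else aPairLoop rest

-- second loop: incremental seen-set with early return (only g[i] is read, so a final odd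
-- char is processed normally).
def aUniqLoop : PySem.Set Char → List Char → Bool
  | _, [] => true
  | seen, [a] => !(PySem.Set.contains seen (PySem.Chars.lowerChar a))
  | seen, a :: _ :: rest =>
      if PySem.Set.contains seen (PySem.Chars.lowerChar a) then false
      else aUniqLoop (PySem.Set.add seen (PySem.Chars.lowerChar a)) rest

def validate_genotype (genotype : String) (gene_count : Int) : Bool :=
  let g := PySem.Str.replace (PySem.Str.strip genotype) " " ""
  if (PySem.Str.len g : Int) ≠ gene_count * 2 then false
  else if aPairLoop g.toList then aUniqLoop PySem.Set.empty g.toList else false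

-- ===== PORT B =====
-- inner loop: any(a == g[j].lower() for j in range(i+2, len(g), 2)) — scan the even offsets of
-- the remaining suffix (a final odd char is read like any other; only index j is accessed).
def bAny (a : Char) : List Char → Bool
  | [] => false
  | [x] => a == PySem.Chars.lowerChar x
  | x :: _ :: rest => a == PySem.Chars.lowerChar x || bAny a rest

-- outer loop over pairs; the [_] case (g[i+1] would raise) is unreachable: g has even length.
def bCheck : List Char → Bool
  | [] => true
  | [_] => false
  | a :: b :: rest =>
      let la := PySem.Chars.lowerChar a
      if la != PySem.Chars.lowerChar b then false
      else if bAny la rest then false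
      else bCheck rest

def validate_genotype_alt (genotype : String) (gene_count : Int) : Bool :=
  let g := PySem.Str.replace (PySem.Str.strip genotype) " " ""
  if (PySem.Str.len g : Int) ≠ gene_count * 2 then false
  else bCheck g.toList

-- ===== PRECONDITION & SPEC =====
def Spec_validate_genotype (genotype : String) (gene_count : Int) (out : Bool) : Prop := out = validate_genotype_alt genotype gene_count
instance (genotype : String) (gene_count : Int) (out : Bool) : Decidable (Spec_validate_genotype genotype gene_count out) := by unfold Spec_validate_genotype; infer_instance

-- ===== CLAIM (what is proved, stated in full; the proofs are below) =====
def Claim_equal_validate_genotype : Prop := ∀ (genotype : String) (gene_count : Int), Dom_validate_genotype genotype gene_count → Spec_validate_genotype genotype gene_count (validate_genotype genotype gene_count)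

-- ===== LEMMAS AND PROOFS =====

-- the lowered even-indexed letters of the string
def firsts : List Char → List Char
  | [] => []
  | [a] => [PySem.Chars.lowerChar a]
  | a :: _ :: rest => PySem.Chars.lowerChar a :: firsts rest

theorem bAny_eq (a : Char) (cs : List Char) : bAny a cs = decide (a ∈ firsts cs) := by
  induction cs using firsts.induct with
  | case1 => simp [bAny, firsts]
  | case2 x => simp [bAny, firsts, Bool.beq_eq_decide_eq]
  | case3 x y rest ih => simp [bAny, firsts, ih, Bool.beq_eq_decide_eq]

theorem bCheck_eq (cs : List Char) :
    bCheck cs = (aPairLoop cs && decide (firsts cs).Nodup) := by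
  induction cs using firsts.induct with
  | case1 => simp [bCheck, aPairLoop, firsts]
  | case2 x => simp [bCheck, aPairLoop]
  | case3 a b rest ih =>
      simp only [bCheck, aPairLoop, firsts, bAny_eq]
      by_cases h : PySem.Chars.lowerChar a != PySem.Chars.lowerChar b
      · simp [h]
      · by_cases hm : PySem.Chars.lowerChar a ∈ firsts rest
        · simp [h, hm]
        · simp [h, hm, ih]

theorem aUniqLoop_iff (cs : List Char) : ∀ seen : PySem.Set Char, seen.Nodup →
    (aUniqLoop seen cs = true ↔ (seen ++ firsts cs).Nodup) := by
  induction cs using firsts.induct with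
  | case1 => intro seen hs; simpa [aUniqLoop, firsts]
  | case2 a =>
      intro seen hs
      simp [aUniqLoop, firsts, List.nodup_append, hs]
      exact ⟨fun h x hx e => h (e ▸ hx), fun h hm => h _ hm rfl⟩
  | case3 a b rest ih =>
      intro seen hs
      by_cases h : PySem.Set.contains seen (PySem.Chars.lowerChar a)
      · have hmem : PySem.Chars.lowerChar a ∈ seen := by simpa using h
        simp only [aUniqLoop, h, if_true, firsts]
        constructor
        · intro hh; cases hh
        · intro hn
          rw [List.nodup_append] at hn
          exact (hn.2.2 _ hmem _ (by simp) rfl).elim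
      · have hmem : PySem.Chars.lowerChar a ∉ seen := by simpa using h
        have hs' : (PySem.Set.add seen (PySem.Chars.lowerChar a)).Nodup :=
          PySem.Set.nodup_add _ _ hs
        simp only [aUniqLoop, h, firsts, Bool.false_eq_true, if_false]
        rw [ih _ hs']
        have hadd : PySem.Set.add seen (PySem.Chars.lowerChar a) = seen ++ [PySem.Chars.lowerChar a] := by
          simp [PySem.Set.add, hmem]
        rw [hadd, show (seen ++ [PySem.Chars.lowerChar a]) ++ firsts rest
              = seen ++ PySem.Chars.lowerChar a :: firsts rest by simp]

-- ===== VERDICT (by name: the statement is the Claim_ definition above) =====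
theorem validate_genotype_spec : Claim_equal_validate_genotype := by
  intro genotype gene_count _
  unfold Spec_validate_genotype validate_genotype validate_genotype_alt
  by_cases hlen : (PySem.Str.len (PySem.Str.replace (PySem.Str.strip genotype) " " "") : Int) ≠ gene_count * 2
  · rw [if_pos hlen, if_pos hlen]
  · rw [if_neg hlen, if_neg hlen]
    generalize (PySem.Str.replace (PySem.Str.strip genotype) " " "").toList = cs
    rw [bCheck_eq]
    by_cases hp : aPairLoop cs
    · rw [if_pos hp, hp, Bool.true_and]
      have h1 := aUniqLoop_iff cs PySem.Set.empty List.nodup_nil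
      simp only [PySem.Set.empty, List.nil_append] at h1
      apply Bool.coe_iff_coe.1
      show aUniqLoop [] cs = true ↔ _
      rw [h1]
      simp
    · have hpf : aPairLoop cs = false := by simpa using hp
      rw [if_neg hp, hpf, Bool.false_and]
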